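-- pv_equiv track=rewrite | github.com/sh0416/clrcmd | simcse/data.py | create_perfect_overlap_pairs_from_tokens
-- ===== SOURCE A (Python) =====
-- import itertools
-- from typing import Any, Dict, List, Optional, Tuple, Union
--
-- Pair = Tuple[int, int]
--
-- def create_intervals(tokens: List[str]) -> List[Pair]:
--     start_pos = itertools.accumulate(map(len, tokens), initial=0)
--     length = map(len, tokens)
--     return list(map(lambda x: (x[0], x[0] + x[1]), zip(start_pos, length)))
--
-- def create_perfect_overlap_pairs_from_intervals(
--     intervals1: List[Pair], intervals2: List[Pair]
-- ) -> List[Tuple[Pair, Pair]]: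
--     pipeline = itertools.product(intervals1, intervals2)
--     pipeline = filter(lambda x: x[0] == x[1], pipeline)
--     return list(pipeline)
--
-- def create_perfect_overlap_pairs_from_tokens(
--     tokens1: List[str], tokens2: List[str]
-- ) -> List[Tuple[int, int]]:
--     intervals1 = create_intervals(tokens1)
--     intervals2 = create_intervals(tokens2)
--     # NOTE: Due to the special token, the index starts with 1
--     interval2idx1 = {x: i for i, x in enumerate(intervals1, start=1)}
--     interval2idx2 = {x: i for i, x in enumerate(intervals2, start=1)}
--     pairs = create_perfect_overlap_pairs_from_intervals(intervals1, intervals2)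
--     # Index pair
--     pairs = [(interval2idx1[x], interval2idx2[y]) for x, y in pairs]
--     return pairs
-- ===== SOURCE B (Python) =====
-- def create_perfect_overlap_pairs_from_tokens(tokens1, tokens2):
--     # Hash join: count + last-index maps replace the quadratic product scan.
--     def intervals(tokens):
--         out, pos = [], 0
--         for t in tokens:
--             out.append((pos, pos + len(t)))
--             pos += len(t)
--         return out
--     iv1 = intervals(tokens1)
--     iv2 = intervals(tokens2)
--     last1 = {x: i for i, x in enumerate(iv1, start=1)}
--     last2 = {x: i for i, x in enumerate(iv2, start=1)}
--     cnt2 = {}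
--     for x in iv2:
--         cnt2[x] = cnt2.get(x, 0) + 1
--     pairs = []
--     for x in iv1:
--         c = cnt2.get(x, 0)
--         if c:
--             pairs += [(last1[x], last2[x])] * c
--     return pairs
-- ===== Notes on version B (the rewrite author's own statement) =====
-- stated objective: faster
-- what changed: Replaces the itertools.product-and-filter quadratic join of the two interval lists by a hash join: a count map and last-index maps built once, then a single pass over intervals1 emitting count2(x) copies of the index pair.
import Mathlib
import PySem

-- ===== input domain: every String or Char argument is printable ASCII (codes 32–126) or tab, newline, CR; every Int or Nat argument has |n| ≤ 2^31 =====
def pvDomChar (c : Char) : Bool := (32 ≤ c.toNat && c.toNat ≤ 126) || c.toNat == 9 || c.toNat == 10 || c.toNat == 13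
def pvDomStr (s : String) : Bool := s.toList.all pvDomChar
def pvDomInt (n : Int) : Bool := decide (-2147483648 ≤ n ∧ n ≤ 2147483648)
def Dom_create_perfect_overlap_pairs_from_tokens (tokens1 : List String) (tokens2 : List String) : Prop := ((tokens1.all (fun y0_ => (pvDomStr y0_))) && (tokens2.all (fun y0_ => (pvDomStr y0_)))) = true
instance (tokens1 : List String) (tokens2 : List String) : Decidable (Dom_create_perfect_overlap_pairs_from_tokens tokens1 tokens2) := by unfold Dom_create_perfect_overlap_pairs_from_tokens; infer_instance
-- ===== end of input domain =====

-- B replaces A's quadratic product-and-filter join by a hash join (count + last-index maps); objective: faster.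

-- ===== PORT A =====
-- itertools.accumulate(map(len, tokens), initial=0): prefix sums, starting with 0
def pvAccum : Int → List Int → List Int
  | s, [] => [s]
  | s, x :: xs => s :: pvAccum (s + x) xs

-- create_intervals: zip(start_pos, length) mapped to (start, start+len)
def pvIntervalsA (tokens : List String) : List (Int × Int) :=
  ((pvAccum 0 (tokens.map PySem.Str.len)).zip (tokens.map PySem.Str.len)).map
    (fun p => (p.1, p.1 + p.2))

-- {x: i for i, x in enumerate(intervals, start=1)}  (both Pythons contain this identical comprehension)
def pvLastIdx (l : List (Int × Int)) : PySem.Dict (Int × Int) Int :=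
  (PySem.List.enumerate l 1).foldl (fun d p => d.insert p.2 p.1) PySem.Dict.empty

def create_perfect_overlap_pairs_from_tokens (tokens1 : List String) (tokens2 : List String) : List (Int × Int) :=
  let intervals1 := pvIntervalsA tokens1
  let intervals2 := pvIntervalsA tokens2
  let d1 := pvLastIdx intervals1
  let d2 := pvLastIdx intervals2
  -- create_perfect_overlap_pairs_from_intervals: itertools.product then filter x[0] == x[1]
  let pairs := intervals1.flatMap (fun a => (intervals2.filter (fun b => b == a)).map (fun b => (a, b)))
  -- d1[x] / d2[y]: the keys are always present (x ∈ intervals1, y ∈ intervals2), so getD _ 0 is exact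
  pairs.map (fun p => (d1.getD p.1 0, d2.getD p.2 0))

-- ===== PORT B =====
-- running-position loop building intervals
def pvIntervalsB : Int → List String → List (Int × Int)
  | _, [] => []
  | pos, t :: ts => (pos, pos + PySem.Str.len t) :: pvIntervalsB (pos + PySem.Str.len t) ts

def create_perfect_overlap_pairs_from_tokens_alt (tokens1 : List String) (tokens2 : List String) : List (Int × Int) :=
  let iv1 := pvIntervalsB 0 tokens1
  let iv2 := pvIntervalsB 0 tokens2
  let last1 := pvLastIdx iv1
  let last2 := pvLastIdx iv2
  -- cnt2[x] = cnt2.get(x, 0) + 1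
  let cnt2 : PySem.Dict (Int × Int) Int := iv2.foldl (fun d x => d.insert x (d.getD x 0 + 1)) PySem.Dict.empty
  -- pairs += [(last1[x], last2[x])] * c  when c is truthy (last1/last2 keys always present: x ∈ iv1 and cnt2 hit means x ∈ iv2)
  iv1.foldl (fun pairs x =>
    let c := cnt2.getD x 0
    if c ≠ 0 then pairs ++ List.replicate c.toNat (last1.getD x 0, last2.getD x 0) else pairs) []

-- ===== PRECONDITION & SPEC =====
def Spec_create_perfect_overlap_pairs_from_tokens (tokens1 : List String) (tokens2 : List String) (out : List (Int × Int)) : Prop := out = create_perfect_overlap_pairs_from_tokens_alt tokens1 tokens2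
instance (tokens1 : List String) (tokens2 : List String) (out : List (Int × Int)) : Decidable (Spec_create_perfect_overlap_pairs_from_tokens tokens1 tokens2 out) := by unfold Spec_create_perfect_overlap_pairs_from_tokens; infer_instance

-- ===== CLAIM (what is proved, stated in full; the proofs are below) =====
def Claim_equal_create_perfect_overlap_pairs_from_tokens : Prop := ∀ (tokens1 : List String) (tokens2 : List String), Dom_create_perfect_overlap_pairs_from_tokens tokens1 tokens2 → Spec_create_perfect_overlap_pairs_from_tokens tokens1 tokens2 (create_perfect_overlap_pairs_from_tokens tokens1 tokens2)

-- ===== LEMMAS AND PROOFS =====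

-- the two interval builders agree
theorem pvIntervals_eq (tokens : List String) :
    ∀ s : Int, ((pvAccum s (tokens.map PySem.Str.len)).zip (tokens.map PySem.Str.len)).map
      (fun p => (p.1, p.1 + p.2)) = pvIntervalsB s tokens := by
  induction tokens with
  | nil => intro s; simp [pvAccum, pvIntervalsB]
  | cons t ts ih => intro s; simp [pvAccum, pvIntervalsB, ih]

theorem pvIntervalsA_eq (tokens : List String) : pvIntervalsA tokens = pvIntervalsB 0 tokens :=
  pvIntervals_eq tokens 0

-- filtering for elements equal to a, then mapping, is a replicate of count copies
theorem filter_beq_map {β : Type} (l : List (Int × Int)) (a : Int × Int) (f : (Int × Int) → β) :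
    ((l.filter (fun b => b == a)).map f) = List.replicate (l.count a) (f a) := by
  induction l with
  | nil => simp
  | cons x xs ih =>
    by_cases hx : x = a
    · subst hx; simp [ih, List.count_cons_self, List.replicate_succ]
    · simp [hx, ih]

theorem core_lemma (i1 i2 : List (Int × Int)) (d1 d2 : PySem.Dict (Int × Int) Int) :
    (i1.flatMap (fun a => (i2.filter (fun b => b == a)).map (fun b => (a, b)))).map
      (fun p => (d1.getD p.1 0, d2.getD p.2 0))
    = i1.foldl (fun pairs x =>
        let c := ((i2.foldl (fun d y => d.insert y (d.getD y 0 + 1)) PySem.Dict.empty : PySem.Dict (Int × Int) Int)).getD x 0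
        if c ≠ 0 then pairs ++ List.replicate c.toNat (d1.getD x 0, d2.getD x 0) else pairs) [] := by
  have hcnt : ∀ x, (i2.foldl (fun d y => d.insert y (d.getD y 0 + 1)) PySem.Dict.empty).getD x 0
      = (i2.count x : Int) := by
    intro x
    rw [PySem.Dict.getD_foldl_insert_add_one]
    simp
  have hstep : (fun (pairs : List (Int × Int)) x =>
        let c := ((i2.foldl (fun d y => d.insert y (d.getD y 0 + 1)) PySem.Dict.empty : PySem.Dict (Int × Int) Int)).getD x 0
        if c ≠ 0 then pairs ++ List.replicate c.toNat (d1.getD x 0, d2.getD x 0) else pairs)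
      = (fun pairs x => pairs ++ List.replicate (i2.count x) (d1.getD x 0, d2.getD x 0)) := by
    funext pairs x
    simp only [hcnt]
    by_cases h : i2.count x = 0
    · simp [h]
    · simp [h]
  rw [hstep, PySem.List.foldl_append_eq_flatMap, List.map_flatMap]
  simp only [List.nil_append]
  congr 1
  funext a
  rw [List.map_map]
  have := filter_beq_map i2 a (fun b => (d1.getD a 0, d2.getD b 0))
  simpa using this

-- ===== VERDICT (by name: the statement is the Claim_ definition above) =====
theorem create_perfect_overlap_pairs_from_tokens_spec : Claim_equal_create_perfect_overlap_pairs_from_tokens := by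
  intro tokens1 tokens2 _
  unfold Spec_create_perfect_overlap_pairs_from_tokens
  unfold create_perfect_overlap_pairs_from_tokens create_perfect_overlap_pairs_from_tokens_alt
  simp only [pvIntervalsA_eq]
  exact core_lemma (pvIntervalsB 0 tokens1) (pvIntervalsB 0 tokens2) _ _
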